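-- pv_equiv track=rewrite | github.com/juun9714/programmers | bestalbum.py | solution
-- ===== SOURCE A (Python) =====
-- def solution(genres, plays):
--     answer = []
--     gen_tot={}
--     d={}
--
--     for i in range(len(genres)):
--         gen_tot[genres[i]]=gen_tot.get(genres[i],0)+plays[i]
--         d[genres[i]]=d.get(genres[i],[])+[(plays[i],i)]
--
--     gen_sort=sorted(gen_tot.items(), key=lambda x:x[1], reverse=True)
--     for (genre, cnt) in gen_sort:
--         d[genre]=sorted(d[genre], key=lambda x:-x[0])
--         answer+=[idx for (play, idx) in d[genre][:2]]
--
--     return answer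
-- ===== SOURCE B (Python) =====
-- def solution(genres, plays):
--     # one global sort of all song indices by (genre rank, -plays) + one counting pass,
--     # instead of per-genre grouped sorts
--     totals = {}
--     for g, p in zip(genres, plays):
--         totals[g] = totals.get(g, 0) + p
--     ranked = sorted(totals, key=lambda s: -totals[s])
--     rank = {}
--     for r, s in enumerate(ranked):
--         rank[s] = r
--     idxs = sorted(range(len(genres)), key=lambda i: (rank[genres[i]], -plays[i]))
--     answer = []
--     count = {}
--     for i in idxs:
--         s = genres[i]
--         c = count.get(s, 0)
--         if c < 2:
--             answer.append(i)
--             count[s] = c + 1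
--     return answer
-- ===== Notes on version B (the rewrite author's own statement) =====
-- stated objective: faster
-- what changed: Instead of grouping songs per genre (rebuilding each genre's list by concatenation) and sorting each group, B sorts all song indices once by the composite key (genre rank by total plays, -plays) and makes one counting pass keeping at most two indices per genre.
import Mathlib
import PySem

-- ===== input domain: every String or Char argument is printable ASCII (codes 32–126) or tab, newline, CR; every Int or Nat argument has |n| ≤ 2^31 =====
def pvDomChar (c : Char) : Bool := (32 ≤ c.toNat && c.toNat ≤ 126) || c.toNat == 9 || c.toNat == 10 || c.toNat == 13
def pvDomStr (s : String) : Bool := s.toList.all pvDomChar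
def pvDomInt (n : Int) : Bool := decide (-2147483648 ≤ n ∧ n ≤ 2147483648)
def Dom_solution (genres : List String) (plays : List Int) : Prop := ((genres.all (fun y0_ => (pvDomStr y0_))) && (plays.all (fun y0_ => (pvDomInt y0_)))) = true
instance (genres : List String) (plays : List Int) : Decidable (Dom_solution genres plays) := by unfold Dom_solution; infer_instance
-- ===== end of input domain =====

-- B replaces A's per-genre grouped sorts by one global sort of all song indices by
-- (genre rank by total plays, -plays) plus a single counting pass keeping two per genre.
-- Both raise IndexError when len(genres) > len(plays); Pre_ excludes exactly that.

-- ===== PORT A =====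
def solution (genres : List String) (plays : List Int) : List Int :=
  let loop := (PySem.List.pyRange 0 genres.length 1).foldl
    (fun (st : PySem.Dict String Int × PySem.Dict String (List (Int × Int))) i =>
      let g := PySem.List.pyGetD genres i ""
      let p := PySem.List.pyGetD plays i 0
      (st.1.insert g (st.1.getD g 0 + p),
       st.2.insert g (st.2.getD g [] ++ [(p, i)])))
    (PySem.Dict.empty, PySem.Dict.empty)
  let gen_sort := PySem.List.sorted loop.1.items (fun x => x.2) true
  (gen_sort.foldl
    (fun (st : List Int × PySem.Dict String (List (Int × Int))) gc =>
      let lst := PySem.List.sorted (st.2.getD gc.1 []) (fun x => -x.1) false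
      (st.1 ++ (PySem.List.slice lst none (some 2)).map (fun pi => pi.2),
       st.2.insert gc.1 lst))
    ([], loop.2)).1

-- ===== PORT B =====
def solution_alt (genres : List String) (plays : List Int) : List Int :=
  let totals := (genres.zip plays).foldl
    (fun (d : PySem.Dict String Int) x => d.insert x.1 (d.getD x.1 0 + x.2)) PySem.Dict.empty
  let ranked := PySem.List.sorted totals.keys (fun s => -(totals.getD s 0)) false
  let rank := (PySem.List.enumerate ranked).foldl
    (fun (d : PySem.Dict String Int) x => d.insert x.2 x.1) PySem.Dict.empty
  let idxs := PySem.List.sorted2 (PySem.List.pyRange 0 genres.length 1)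
    (fun i => rank.getD (PySem.List.pyGetD genres i "") 0)
    (fun i => -(PySem.List.pyGetD plays i 0)) false
  (idxs.foldl
    (fun (st : List Int × PySem.Dict String Int) i =>
      let s := PySem.List.pyGetD genres i ""
      let c := st.2.getD s 0
      if c < 2 then (st.1 ++ [i], st.2.insert s (c + 1)) else st)
    ([], PySem.Dict.empty)).1

-- ===== PRECONDITION & SPEC =====
-- Pre_ excludes exactly the inputs with more genres than plays, on which A raises IndexError.
def Pre_solution (genres : List String) (plays : List Int) : Prop := genres.length ≤ plays.length
instance (genres : List String) (plays : List Int) : Decidable (Pre_solution genres plays) := by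
  unfold Pre_solution; infer_instance

def pvWitness_solution : List String × List Int :=
  (["pop", "rock", "pop", "rock", "pop"], [500, 600, 500, 150, 800])

def Spec_solution (genres : List String) (plays : List Int) (out : List Int) : Prop :=
  out = solution_alt genres plays
instance (genres : List String) (plays : List Int) (out : List Int) : Decidable (Spec_solution genres plays out) := by
  unfold Spec_solution; infer_instance

-- ===== CLAIM (what is proved, stated in full; the proofs are below) =====
def Claim_equal_solution : Prop := ∀ (genres : List String) (plays : List Int),
  Dom_solution genres plays → Pre_solution genres plays →
  Spec_solution genres plays (solution genres plays)

-- ===== LEMMAS AND PROOFS =====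

-- two-key strict comparison used by PySem.List.sorted2
def pvLt {α : Type} (k1 k2 : α → Int) : α → α → Bool :=
  fun a b => decide (k1 a < k1 b) || (!decide (k1 b < k1 a) && decide (k2 a < k2 b))

-- lexicographic strict order on (k1, k2, t)
def pvRel {α : Type} (k1 k2 t : α → Int) : α → α → Prop :=
  fun a b => k1 a < k1 b ∨ (k1 a = k1 b ∧ (k2 a < k2 b ∨ (k2 a = k2 b ∧ t a < t b)))

theorem insertBy_congr_mem {α : Type} (b1 b2 : α → α → Bool) (S : α → Prop)
    (h : ∀ a b, S a → S b → b1 a b = b2 a b) (x : α) (l : List α) (hx : S x)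
    (hl : ∀ a ∈ l, S a) : PySem.List.insertBy b1 x l = PySem.List.insertBy b2 x l := by
  induction l with
  | nil => rfl
  | cons y ys ih =>
    simp only [PySem.List.insertBy]
    rw [h x y hx (hl y (by simp))]
    split
    · rfl
    · rw [ih (fun a ha => hl a (by simp [ha]))]

theorem foldl_insertBy_congr {α : Type} (b1 b2 : α → α → Bool) (S : α → Prop)
    (h : ∀ a b, S a → S b → b1 a b = b2 a b) :
    ∀ (xs acc : List α), (∀ a ∈ xs, S a) → (∀ a ∈ acc, S a) →
    xs.foldl (fun acc x => PySem.List.insertBy b1 x acc) acc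
      = xs.foldl (fun acc x => PySem.List.insertBy b2 x acc) acc := by
  intro xs
  induction xs with
  | nil => intro acc _ _; rfl
  | cons x xs ih =>
    intro acc hxs hacc
    simp only [List.foldl_cons]
    rw [insertBy_congr_mem b1 b2 S h x acc (hxs x (by simp)) hacc]
    exact ih _ (fun a ha => hxs a (by simp [ha]))
      (fun a ha => by
        rcases (PySem.List.mem_insertBy b2 x a acc).1 ha with rfl | ha
        · exact hxs a (by simp)
        · exact hacc a ha)

theorem insertBy_map {α β : Type} (f : α → β) (b : β → β → Bool) (x : α) (l : List α) :
    PySem.List.insertBy b (f x) (l.map f)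
      = (PySem.List.insertBy (fun a c => b (f a) (f c)) x l).map f := by
  induction l with
  | nil => rfl
  | cons y ys ih =>
    simp only [List.map_cons, PySem.List.insertBy]
    split
    · simp
    · simp [ih]

theorem foldl_insertBy_map {α β : Type} (f : α → β) (b : β → β → Bool) :
    ∀ (xs acc : List α),
    (xs.map f).foldl (fun acc x => PySem.List.insertBy b x acc) (acc.map f)
      = (xs.foldl (fun acc x => PySem.List.insertBy (fun a c => b (f a) (f c)) x acc) acc).map f := by
  intro xs
  induction xs with
  | nil => intro acc; rfl
  | cons x xs ih =>
    intro acc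
    simp only [List.map_cons, List.foldl_cons]
    rw [insertBy_map f b x acc, ih]

-- stability: inserting an element t-later than everything keeps pvRel pairwise
theorem insertBy_pairwise_pvRel {α : Type} (k1 k2 t : α → Int) (x : α) :
    ∀ (acc : List α), acc.Pairwise (pvRel k1 k2 t) → (∀ a ∈ acc, t a < t x) →
    (PySem.List.insertBy (pvLt k1 k2) x acc).Pairwise (pvRel k1 k2 t) := by
  intro acc
  induction acc with
  | nil => intro _ _; simp [PySem.List.insertBy]
  | cons y ys ih =>
    intro hp ht
    simp only [PySem.List.insertBy]
    rcases List.pairwise_cons.1 hp with ⟨hy, hys⟩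
    split
    · rename_i hbef
      have hxy : k1 x < k1 y ∨ (k1 x = k1 y ∧ k2 x < k2 y) := by
        simp only [pvLt, Bool.or_eq_true, Bool.and_eq_true, Bool.not_eq_true',
          decide_eq_true_eq, decide_eq_false_iff_not] at hbef
        omega
      refine List.pairwise_cons.2 ⟨?_, hp⟩
      intro z hz
      rcases List.mem_cons.1 hz with rfl | hz
      · unfold pvRel; omega
      · have := hy z hz
        unfold pvRel at this ⊢; omega
    · rename_i hbef
      have hxy : k1 y < k1 x ∨ (k1 y = k1 x ∧ ¬ (k2 x < k2 y)) := by
        simp only [pvLt, Bool.or_eq_true, Bool.and_eq_true, Bool.not_eq_true',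
          decide_eq_true_eq, decide_eq_false_iff_not] at hbef
        omega
      refine List.pairwise_cons.2 ⟨?_, ih hys (fun a ha => ht a (by simp [ha]))⟩
      intro z hz
      rcases (PySem.List.mem_insertBy _ x z ys).1 hz with rfl | hz
      · have hty : t y < t z := ht y (by simp)
        unfold pvRel; omega
      · exact hy z hz

theorem foldl_insertBy_pairwise {α : Type} (k1 k2 t : α → Int) :
    ∀ (xs acc : List α), xs.Pairwise (fun a b => t a < t b) →
      acc.Pairwise (pvRel k1 k2 t) → (∀ a ∈ acc, ∀ b ∈ xs, t a < t b) →
    (xs.foldl (fun acc x => PySem.List.insertBy (pvLt k1 k2) x acc) acc).Pairwise (pvRel k1 k2 t) := by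
  intro xs
  induction xs with
  | nil => intro acc _ hacc _; exact hacc
  | cons x xs ih =>
    intro acc hxs hacc ht
    rcases List.pairwise_cons.1 hxs with ⟨hx, hxs'⟩
    simp only [List.foldl_cons]
    refine ih _ hxs' (insertBy_pairwise_pvRel k1 k2 t x acc hacc
      (fun a ha => ht a ha x (by simp))) ?_
    intro a ha b hb
    rcases (PySem.List.mem_insertBy _ x a acc).1 ha with rfl | ha
    · exact hx b hb
    · exact ht a ha b (by simp [hb])

theorem sorted2_pairwise_stable {α : Type} (xs : List α) (k1 k2 t : α → Int)
    (h : xs.Pairwise (fun a b => t a < t b)) :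
    (PySem.List.sorted2 xs k1 k2 false).Pairwise (pvRel k1 k2 t) := by
  have : PySem.List.sorted2 xs k1 k2 false
      = xs.foldl (fun acc x => PySem.List.insertBy (pvLt k1 k2) x acc) [] := rfl
  rw [this]
  exact foldl_insertBy_pairwise k1 k2 t xs [] h (by simp) (by simp)

theorem sorted_pairwise_stable {α : Type} (xs : List α) (key t : α → Int)
    (h : xs.Pairwise (fun a b => t a < t b)) :
    (PySem.List.sorted xs key false).Pairwise (pvRel key (fun _ => 0) t) := by
  have h1 : PySem.List.sorted xs key false
      = xs.foldl (fun acc x => PySem.List.insertBy (fun a b => decide (key a < key b)) x acc) [] := rfl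
  rw [h1, foldl_insertBy_congr _ (pvLt key (fun _ => 0)) (fun _ => True)
    (by intro a b _ _; simp [pvLt]) xs [] (by simp) (by simp)]
  exact foldl_insertBy_pairwise key (fun _ => 0) t xs [] h (by simp) (by simp)

-- reverse sort by key = forward sort by -key (Int keys)
theorem sorted_rev_eq_sorted_neg {α : Type} (xs : List α) (key : α → Int) :
    PySem.List.sorted xs key true = PySem.List.sorted xs (fun x => -key x) false := by
  have h1 : PySem.List.sorted xs key true
      = xs.foldl (fun acc x => PySem.List.insertBy (fun a b => decide (key b < key a)) x acc) [] := rfl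
  have h2 : PySem.List.sorted xs (fun x => -key x) false
      = xs.foldl (fun acc x => PySem.List.insertBy (fun a b => decide (-key a < -key b)) x acc) [] := rfl
  rw [h1, h2]
  exact foldl_insertBy_congr _ _ (fun _ => True)
    (by intro a b _ _; simp only [decide_eq_decide]; omega) xs [] (by simp) (by simp)

theorem sorted_map_eq {α β : Type} (f : α → β) (l : List α) (key : β → Int) (rev : Bool) :
    PySem.List.sorted (l.map f) key rev = (PySem.List.sorted l (fun x => key (f x)) rev).map f := by
  cases rev
  · have h1 : PySem.List.sorted (l.map f) key false
        = (l.map f).foldl (fun acc x => PySem.List.insertBy (fun a b => decide (key a < key b)) x acc) [] := rfl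
    have h2 : PySem.List.sorted l (fun x => key (f x)) false
        = l.foldl (fun acc x => PySem.List.insertBy (fun a b => decide (key (f a) < key (f b))) x acc) [] := rfl
    rw [h1, h2]
    have := foldl_insertBy_map f (fun a b => decide (key a < key b)) l []
    simpa using this
  · have h1 : PySem.List.sorted (l.map f) key true
        = (l.map f).foldl (fun acc x => PySem.List.insertBy (fun a b => decide (key b < key a)) x acc) [] := rfl
    have h2 : PySem.List.sorted l (fun x => key (f x)) true
        = l.foldl (fun acc x => PySem.List.insertBy (fun a b => decide (key (f b) < key (f a))) x acc) [] := rfl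
    rw [h1, h2]
    have := foldl_insertBy_map f (fun a b => decide (key b < key a)) l []
    simpa using this

theorem getD_foldl_insert_add {κ β : Type} [BEq κ] [LawfulBEq κ] [DecidableEq κ]
    (key : β → κ) (val : β → Int) :
    ∀ (l : List β) (d : PySem.Dict κ Int) (k : κ),
    (l.foldl (fun d x => d.insert (key x) (d.getD (key x) 0 + val x)) d).getD k 0
      = d.getD k 0 + ((l.filter (fun x => key x == k)).map val).sum := by
  intro l
  induction l with
  | nil => intro d k; simp
  | cons x l ih =>
    intro d k
    simp only [List.foldl_cons, ih, List.filter_cons]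
    by_cases hk : key x = k
    · simp [hk]
      ring
    · have hb : (key x == k) = false := by simp [hk]
      simp [hb, PySem.Dict.getD_insert, Ne.symm hk]

theorem getD_foldl_insert_append {κ β ν : Type} [BEq κ] [LawfulBEq κ] [DecidableEq κ]
    (key : β → κ) (val : β → ν) :
    ∀ (l : List β) (d : PySem.Dict κ (List ν)) (k : κ),
    (l.foldl (fun d x => d.insert (key x) (d.getD (key x) [] ++ [val x])) d).getD k []
      = d.getD k [] ++ ((l.filter (fun x => key x == k)).map val) := by
  intro l
  induction l with
  | nil => intro d k; simp
  | cons x l ih =>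
    intro d k
    simp only [List.foldl_cons, ih, List.filter_cons]
    by_cases hk : key x = k
    · simp [hk]
    · have hb : (key x == k) = false := by simp [hk]
      simp [hb, PySem.Dict.getD_insert, Ne.symm hk]


theorem flatMap_congr_mem {α β : Type} (l : List α) (f g : α → List β)
    (h : ∀ a ∈ l, f a = g a) : l.flatMap f = l.flatMap g := by
  induction l with
  | nil => rfl
  | cons x l ih =>
    simp only [List.flatMap_cons]
    rw [h x (by simp), ih (fun a ha => h a (by simp [ha]))]

theorem flatMap_perm_flatMap {α β : Type} (l : List α) (f g : α → List β)
    (h : ∀ a ∈ l, (f a).Perm (g a)) : (l.flatMap f).Perm (l.flatMap g) := by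
  induction l with
  | nil => simp
  | cons x l ih =>
    simp only [List.flatMap_cons]
    exact (h x (by simp)).append (ih (fun a ha => h a (by simp [ha])))

theorem flatMap_filter_perm {α κ : Type} [BEq κ] [LawfulBEq κ] :
    ∀ (R : List κ) (xs : List α) (g : α → κ), R.Nodup → (∀ x ∈ xs, g x ∈ R) →
    (R.flatMap (fun s => xs.filter (fun x => g x == s))).Perm xs := by
  intro R
  induction R with
  | nil => intro xs g _ hm; simp only [List.flatMap_nil]
           cases xs with
           | nil => exact List.Perm.refl _
           | cons x xs => exact absurd (hm x (by simp)) (by simp)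
  | cons s R ih =>
    intro xs g hnd hm
    rcases List.nodup_cons.1 hnd with ⟨hs, hnd'⟩
    simp only [List.flatMap_cons]
    have hrest : (R.flatMap fun s' => xs.filter (fun x => g x == s'))
        = R.flatMap (fun s' => (xs.filter (fun x => !(g x == s))).filter (fun x => g x == s')) := by
      apply flatMap_congr_mem
      intro s' hs'
      have hne : s' ≠ s := fun hc => hs (hc ▸ hs')
      rw [List.filter_filter]
      apply List.filter_congr
      intro x _
      by_cases h1 : g x = s'
      · simp [h1, hne]
      · simp [h1]
    rw [hrest]
    have hmem' : ∀ x ∈ xs.filter (fun x => !(g x == s)), g x ∈ R := by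
      intro x hx
      rcases List.mem_filter.1 hx with ⟨hx1, hx2⟩
      rcases List.mem_cons.1 (hm x hx1) with h | h
      · exact absurd h (by simpa using hx2)
      · exact h
    exact (List.Perm.append_left _ (ih _ g hnd' hmem')).trans (List.filter_append_perm _ xs)


theorem pairwise_flatMap {α β : Type} (r : β → β → Prop) (f : α → List β) :
    ∀ (R : List α), R.Pairwise (fun s s' => ∀ a ∈ f s, ∀ b ∈ f s', r a b) →
      (∀ s ∈ R, (f s).Pairwise r) → (R.flatMap f).Pairwise r := by
  intro R
  induction R with
  | nil => intro _ _; simp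
  | cons s R ih =>
    intro hp hin
    rcases List.pairwise_cons.1 hp with ⟨hhead, htail⟩
    simp only [List.flatMap_cons]
    rw [List.pairwise_append]
    refine ⟨hin s (by simp), ih htail (fun s' hs' => hin s' (by simp [hs'])), ?_⟩
    intro a ha b hb
    rcases List.mem_flatMap.1 hb with ⟨s', hs', hbs'⟩
    exact hhead s' hs' a ha b hbs'

-- counting pass over one genre block
theorem count_block (gg : Int → String) (s : String) :
    ∀ (blk : List Int), (∀ i ∈ blk, gg i = s) → ∀ (c : Int), 0 ≤ c →
      ∀ (d : PySem.Dict String Int) (ans : List Int), d.getD s 0 = c →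
    ∃ d', blk.foldl (fun st i =>
        let t := gg i
        let cc := st.2.getD t 0
        if cc < 2 then (st.1 ++ [i], st.2.insert t (cc + 1)) else st) (ans, d)
      = (ans ++ blk.take (2 - c).toNat, d')
      ∧ ∀ k, k ≠ s → d'.getD k 0 = d.getD k 0 := by
  intro blk
  induction blk with
  | nil => intro _ c _ d ans _; exact ⟨d, by simp, fun _ _ => rfl⟩
  | cons i blk ih =>
    intro hg c hc d ans hd
    have hgi : gg i = s := hg i (by simp)
    simp only [List.foldl_cons, hgi, hd]
    by_cases h2 : c < 2
    · have hlt : (if c < 2 then (ans ++ [i], d.insert s (c + 1)) else (ans, d)) = (ans ++ [i], d.insert s (c + 1)) := by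
        simp [h2]
      simp only [h2, if_pos]
      rcases ih (fun j hj => hg j (by simp [hj])) (c + 1) (by omega) (d.insert s (c + 1)) (ans ++ [i])
          (by simp) with ⟨d', heq, hpres⟩
      refine ⟨d', ?_, ?_⟩
      · rw [heq]
        have : (2 - c).toNat = (2 - (c + 1)).toNat + 1 := by omega
        simp [this, List.append_assoc]
      · intro k hk
        rw [hpres k hk, PySem.Dict.getD_insert]
        simp [hk]
    · simp only [h2, if_neg, not_false_iff]
      rcases ih (fun j hj => hg j (by simp [hj])) c hc d ans hd with ⟨d', heq, hpres⟩
      refine ⟨d', ?_, hpres⟩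
      rw [heq]
      have : (2 - c).toNat = 0 := by omega
      simp [this]

theorem count_pass (gg : Int → String) (f : String → List Int) :
    ∀ (R : List String), R.Nodup → (∀ s ∈ R, ∀ i ∈ f s, gg i = s) →
      ∀ (d : PySem.Dict String Int) (ans : List Int), (∀ s ∈ R, d.getD s 0 = 0) →
    ((R.flatMap f).foldl (fun st i =>
        let t := gg i
        let cc := st.2.getD t 0
        if cc < 2 then (st.1 ++ [i], st.2.insert t (cc + 1)) else st) (ans, d)).1
      = ans ++ R.flatMap (fun s => (f s).take 2) := by
  intro R
  induction R with
  | nil => intro _ _ d ans _; simp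
  | cons s R ih =>
    intro hnd hg d ans hd
    rcases List.nodup_cons.1 hnd with ⟨hs, hnd'⟩
    simp only [List.flatMap_cons, List.foldl_append]
    rcases count_block gg s (f s) (hg s (by simp)) 0 (by omega) d ans (hd s (by simp))
      with ⟨d', heq, hpres⟩
    rw [heq]
    have h0 : ∀ s' ∈ R, d'.getD s' 0 = 0 := by
      intro s' hs'
      rw [hpres s' (fun hc => hs (hc ▸ hs'))]
      exact hd s' (by simp [hs'])
    rw [ih hnd' (fun s' hs' => hg s' (by simp [hs'])) d' _ h0]
    simp [List.append_assoc]

-- the A-side answer loop (with the d[genre]=sorted(...) mutation carried through)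
theorem answer_loop (tot' : String → Int) :
    ∀ (R : List String), R.Nodup →
      ∀ (dd : PySem.Dict String (List (Int × Int))) (ans : List Int),
    ((R.map (fun s => (s, tot' s))).foldl
        (fun (st : List Int × PySem.Dict String (List (Int × Int))) gc =>
          let lst := PySem.List.sorted (st.2.getD gc.1 []) (fun x => -x.1) false
          (st.1 ++ (PySem.List.slice lst none (some 2)).map (fun pi => pi.2),
           st.2.insert gc.1 lst)) (ans, dd)).1
      = ans ++ R.flatMap (fun s =>
          (PySem.List.slice (PySem.List.sorted (dd.getD s []) (fun x => -x.1) false)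
            none (some 2)).map (fun pi => pi.2)) := by
  intro R
  induction R with
  | nil => intro _ dd ans; simp
  | cons s R ih =>
    intro hnd dd ans
    rcases List.nodup_cons.1 hnd with ⟨hs, hnd'⟩
    simp only [List.map_cons, List.foldl_cons, List.flatMap_cons]
    rw [ih hnd']
    have : ∀ s' ∈ R,
        ((dd.insert s (PySem.List.sorted (dd.getD s []) (fun x => -x.1) false)).getD s' [])
          = dd.getD s' [] := by
      intro s' hs'
      rw [PySem.Dict.getD_insert]
      simp [show s' ≠ s from fun hc => hs (hc ▸ hs')]
    rw [flatMap_congr_mem R _ _ (fun s' hs' => by rw [this s' hs'])]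
    simp [List.append_assoc]


-- ===== concrete abbreviations =====
def pvG (genres : List String) (i : Int) : String := PySem.List.pyGetD genres i ""
def pvP (plays : List Int) (i : Int) : Int := PySem.List.pyGetD plays i 0
def pvI (genres : List String) : List Int := PySem.List.pyRange 0 genres.length 1
def pvTot (genres : List String) (plays : List Int) (s : String) : Int :=
  (((pvI genres).filter (fun i => pvG genres i == s)).map (pvP plays)).sum
def pvRk (genres : List String) (plays : List Int) : List String :=
  PySem.List.sorted (PySem.Set.ofList genres) (fun s => -(pvTot genres plays s)) false
def pvSG (genres : List String) (plays : List Int) (s : String) : List Int :=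
  PySem.List.sorted ((pvI genres).filter (fun i => pvG genres i == s)) (fun i => -(pvP plays i)) false
def pvTarget (genres : List String) (plays : List Int) : List Int :=
  (pvRk genres plays).flatMap (fun s => (pvSG genres plays s).take 2)

theorem pvI_eq (genres : List String) : pvI genres = (List.range genres.length).map (fun k : Nat => (k : Int)) :=
  PySem.List.pyRange_zero_natCast genres.length

theorem pvI_pairwise (genres : List String) : (pvI genres).Pairwise (fun a b => a < b) := by
  rw [pvI_eq]
  exact List.Pairwise.map _ (fun a b h => by exact_mod_cast h) List.pairwise_lt_range

theorem pvG_mem (genres : List String) (i : Int) (hi : i ∈ pvI genres) : pvG genres i ∈ genres := by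
  rw [pvI_eq] at hi
  rcases List.mem_map.1 hi with ⟨k, hk, rfl⟩
  rw [List.mem_range] at hk
  simp [pvG, PySem.List.pyGetD_natCast, List.getElem?_eq_getElem hk]

theorem pvMapG (genres : List String) : (pvI genres).map (pvG genres) = genres := by
  have := PySem.List.map_pyGetD_pyRange_zero genres ""
  simpa [PySem.List.len, pvI, pvG] using this

theorem pvZip (genres : List String) (plays : List Int) (h : genres.length ≤ plays.length) :
    genres.zip plays = (pvI genres).map (fun i => (pvG genres i, pvP plays i)) := by
  rw [pvI_eq, List.map_map]
  apply List.ext_getElem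
  · simp [Nat.min_eq_left h]
  · intro j h1 h2
    simp only [List.getElem_zip, List.getElem_map, List.getElem_range, Function.comp]
    have hj : j < genres.length := by simpa using h2
    simp [pvG, pvP, PySem.List.pyGetD_natCast,
      List.getElem?_eq_getElem hj, List.getElem?_eq_getElem (lt_of_lt_of_le hj h)]

theorem pvRk_nodup (genres : List String) (plays : List Int) : (pvRk genres plays).Nodup :=
  ((PySem.List.sorted_perm _ _ _).nodup_iff).2 (PySem.Set.nodup_ofList genres)

theorem A_eq (genres : List String) (plays : List Int) :
    solution genres plays = pvTarget genres plays := by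
  simp only [solution]
  rw [PySem.List.foldl_prod_mk
    (f := fun (d : PySem.Dict String Int) (i : Int) =>
      d.insert (PySem.List.pyGetD genres i "")
        (d.getD (PySem.List.pyGetD genres i "") 0 + PySem.List.pyGetD plays i 0))
    (g := fun (d : PySem.Dict String (List (Int × Int))) (i : Int) =>
      d.insert (PySem.List.pyGetD genres i "")
        (d.getD (PySem.List.pyGetD genres i "") [] ++ [(PySem.List.pyGetD plays i 0, i)]))]
  set gen_tot := (PySem.List.pyRange 0 (genres.length : Int) 1).foldl
    (fun (d : PySem.Dict String Int) i =>
      d.insert (PySem.List.pyGetD genres i "")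
        (d.getD (PySem.List.pyGetD genres i "") 0 + PySem.List.pyGetD plays i 0))
    PySem.Dict.empty with hgt
  set dd := (PySem.List.pyRange 0 (genres.length : Int) 1).foldl
    (fun (d : PySem.Dict String (List (Int × Int))) i =>
      d.insert (PySem.List.pyGetD genres i "")
        (d.getD (PySem.List.pyGetD genres i "") [] ++ [(PySem.List.pyGetD plays i 0, i)]))
    PySem.Dict.empty with hdd
  have hkeys : gen_tot.keys = PySem.Set.ofList genres := by
    rw [hgt]
    show ((pvI genres).foldl (fun d i => d.insert (pvG genres i)
      (d.getD (pvG genres i) 0 + pvP plays i)) PySem.Dict.empty).keys = PySem.Set.ofList genres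
    rw [PySem.Dict.keys_foldl_insert_key (pvI genres) (pvG genres)
      (fun d i => d.getD (pvG genres i) 0 + pvP plays i) PySem.Dict.empty,
      PySem.Dict.keys_empty, pvMapG, PySem.Set.update, ← PySem.Set.ofList_eq_foldl]
  have hnodk : gen_tot.keys.Nodup := by
    rw [hkeys]; exact PySem.Set.nodup_ofList genres
  have hgetD : ∀ k, gen_tot.getD k 0 = pvTot genres plays k := by
    intro k
    rw [hgt]
    have := getD_foldl_insert_add (pvG genres) (pvP plays) (pvI genres) PySem.Dict.empty k
    simpa [pvI, pvG, pvP, pvTot, PySem.Dict.getD_empty] using this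
  have hitems : gen_tot.items
      = (PySem.Set.ofList genres).map (fun s => (s, pvTot genres plays s)) := by
    rw [PySem.Dict.items_eq_map_keys gen_tot hnodk 0, hkeys]
    exact List.map_congr_left (fun s _ => by rw [hgetD])
  have hddget : ∀ k, dd.getD k []
      = ((pvI genres).filter (fun i => pvG genres i == k)).map (fun i => (pvP plays i, i)) := by
    intro k
    rw [hdd]
    have := getD_foldl_insert_append (pvG genres) (fun i => (pvP plays i, i))
      (pvI genres) PySem.Dict.empty k
    simpa [pvI, pvG, pvP, PySem.Dict.getD_empty] using this
  have hsort : PySem.List.sorted gen_tot.items (fun x => x.2) true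
      = (pvRk genres plays).map (fun s => (s, pvTot genres plays s)) := by
    rw [hitems, sorted_map_eq, sorted_rev_eq_sorted_neg]
    rfl
  rw [hsort, answer_loop (pvTot genres plays) (pvRk genres plays) (pvRk_nodup genres plays) dd []]
  simp only [List.nil_append, pvTarget]
  apply flatMap_congr_mem
  intro s _
  rw [hddget s, sorted_map_eq]
  rw [PySem.List.slice_to _ (by norm_num : (0:Int) ≤ 2)]
  simp [pvSG, ← List.map_take, Function.comp_def]

theorem B_eq (genres : List String) (plays : List Int) (h : genres.length ≤ plays.length) :
    solution_alt genres plays = pvTarget genres plays := by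
  simp only [solution_alt]
  rw [pvZip genres plays h, List.foldl_map]
  set T := (pvI genres).foldl
    (fun (d : PySem.Dict String Int) i =>
      d.insert (pvG genres i, pvP plays i).1
        (d.getD (pvG genres i, pvP plays i).1 0 + (pvG genres i, pvP plays i).2))
    PySem.Dict.empty with hT
  have hkeys : T.keys = PySem.Set.ofList genres := by
    rw [hT]
    show ((pvI genres).foldl (fun d i => d.insert (pvG genres i)
      (d.getD (pvG genres i) 0 + pvP plays i)) PySem.Dict.empty).keys = PySem.Set.ofList genres
    rw [PySem.Dict.keys_foldl_insert_key (pvI genres) (pvG genres)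
      (fun d i => d.getD (pvG genres i) 0 + pvP plays i) PySem.Dict.empty,
      PySem.Dict.keys_empty, pvMapG, PySem.Set.update, ← PySem.Set.ofList_eq_foldl]
  have hgetD : ∀ k, T.getD k 0 = pvTot genres plays k := by
    intro k
    rw [hT]
    have := getD_foldl_insert_add (pvG genres) (pvP plays) (pvI genres) PySem.Dict.empty k
    simpa [pvTot, PySem.Dict.getD_empty] using this
  have hkf : (fun s => -(T.getD s 0)) = (fun s => -(pvTot genres plays s)) := by
    funext s; rw [hgetD]
  rw [hkeys, hkf]
  have hRnd : (pvRk genres plays).Nodup := pvRk_nodup genres plays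
  set R := PySem.List.sorted (PySem.Set.ofList genres)
    (fun s => -(pvTot genres plays s)) false with hR
  have hRR : R = pvRk genres plays := rfl
  set rank := (PySem.List.enumerate R).foldl
    (fun (d : PySem.Dict String Int) x => d.insert x.2 x.1) PySem.Dict.empty with hrankdef
  have hranknd : rank.keys.Nodup := by
    rw [hrankdef]
    exact PySem.Dict.nodup_keys_foldl_insert_key (PySem.List.enumerate R) (fun x => x.2)
      (fun _ x => x.1) PySem.Dict.empty PySem.Dict.nodup_keys_empty
  have hrankitems : rank.items
      = (PySem.List.enumerate R).map (fun x => (x.2, x.1)) := by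
    rw [hrankdef]
    have := PySem.Dict.items_foldl_insert_fresh (PySem.List.enumerate R)
      (fun x => x.2) (fun x => x.1) PySem.Dict.empty (by simp [PySem.Dict.contains_empty])
      (by rw [PySem.List.map_snd_enumerate]; rw [hRR]; exact hRnd)
    simpa using this
  have hrank : ∀ (q : Nat) (hq : q < R.length), rank.getD R[q] 0 = (q : Int) := by
    intro q hq
    refine PySem.Dict.getD_of_mem_items rank ?_ hranknd 0
    rw [hrankitems]
    refine List.mem_map.2 ⟨((q : Int), R[q]), ?_, rfl⟩
    exact (PySem.List.mem_enumerate_iff R 0 _).2 ⟨q, hq, by simp⟩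
  have hmemSG : ∀ s, ∀ i ∈ pvSG genres plays s, pvG genres i = s := by
    intro s i hi
    have := (PySem.List.mem_sorted _ _ _ _).1 hi
    have := (List.mem_filter.1 this).2
    exact (beq_iff_eq).1 this
  have hidxs : PySem.List.sorted2 (pvI genres)
      (fun i => rank.getD (pvG genres i) 0) (fun i => -(pvP plays i)) false
      = R.flatMap (pvSG genres plays) := by
    apply List.Perm.eq_of_pairwise (le := pvRel (fun i => rank.getD (pvG genres i) 0)
      (fun i => -(pvP plays i)) (fun i => i))
    · intro a b _ _ h1 h2
      simp only [pvRel] at h1 h2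
      omega
    · exact sorted2_pairwise_stable (pvI genres) _ _ (fun i => i) (pvI_pairwise genres)
    · apply pairwise_flatMap
      · rw [List.pairwise_iff_getElem]
        intro p q hp hq hpq a ha b hb
        have hga := hmemSG R[p] a ha
        have hgb := hmemSG R[q] b hb
        refine Or.inl ?_
        show rank.getD (pvG genres a) 0 < rank.getD (pvG genres b) 0
        rw [hga, hgb, hrank p hp, hrank q hq]
        exact_mod_cast hpq
      · intro s hs
        have h1 : (List.filter (fun i => pvG genres i == s) (pvI genres)).Pairwise
            (fun a b => a < b) :=
          List.Pairwise.sublist (List.filter_sublist) (pvI_pairwise genres)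
        have h2 := sorted_pairwise_stable
          (List.filter (fun i => pvG genres i == s) (pvI genres))
          (fun i => -(pvP plays i)) (fun i => i) h1
        refine List.Pairwise.imp_of_mem ?_ h2
        intro a b ha hb hr
        have hga : pvG genres a = s := hmemSG s a ha
        have hgb : pvG genres b = s := hmemSG s b hb
        simp only [pvRel] at hr ⊢
        rw [hga, hgb]
        omega
    · refine (PySem.List.sorted2_perm _ _ _ _).trans ?_
      refine ((flatMap_perm_flatMap R _ _ ?_).trans
        (flatMap_filter_perm R (pvI genres) (pvG genres) (hRR ▸ hRnd) ?_)).symm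
      · intro s _
        exact PySem.List.sorted_perm _ _ _
      · intro i hi
        rw [hRR, pvRk, PySem.List.mem_sorted, PySem.Set.mem_ofList]
        exact pvG_mem genres i hi
  have e1 : (fun i => rank.getD (PySem.List.pyGetD genres i "") 0)
      = (fun i => rank.getD (pvG genres i) 0) := rfl
  have e2 : (fun i : Int => -PySem.List.pyGetD plays i 0) = (fun i => -(pvP plays i)) := rfl
  have e3 : PySem.List.pyRange 0 (genres.length : Int) 1 = pvI genres := rfl
  rw [e1, e2, e3, hidxs]
  have e4 : (fun (st : List Int × PySem.Dict String Int) (i : Int) =>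
        if st.2.getD (PySem.List.pyGetD genres i "") 0 < 2 then
          (st.1 ++ [i], st.2.insert (PySem.List.pyGetD genres i "")
            (st.2.getD (PySem.List.pyGetD genres i "") 0 + 1))
        else st)
      = (fun (st : List Int × PySem.Dict String Int) (i : Int) =>
          let t := pvG genres i
          let cc := st.2.getD t 0
          if cc < 2 then (st.1 ++ [i], st.2.insert t (cc + 1)) else st) := rfl
  rw [e4]
  rw [count_pass (pvG genres) (pvSG genres plays) R (hRR ▸ hRnd)
    (fun s _ => hmemSG s) PySem.Dict.empty [] (fun s _ => PySem.Dict.getD_empty s 0)]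
  simp [pvTarget, hRR]

-- ===== VERDICT (by name: the statement is the Claim_ definition above) =====
theorem solution_spec : Claim_equal_solution := by
  intro genres plays _ hpre
  unfold Spec_solution
  rw [A_eq genres plays, B_eq genres plays hpre]
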